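-- pv_equiv track=rewrite | github.com/MeowKJ/maimai-bot-plus | src/plugins/guess/tools.py | get_version_name
-- ===== SOURCE A (Python) =====
-- versions = [
--     {id: 0, "title": "maimai", "version": 10000},
--     {id: 1, "title": "maimai PLUS", "version": 11000},
--     {id: 2, "title": "GreeN", "version": 12000},
--     {id: 3, "title": "GreeN PLUS", "version": 13000},
--     {id: 4, "title": "ORANGE", "version": 14000},
--     {id: 5, "title": "ORANGE PLUS", "version": 15000},
--     {id: 6, "title": "PiNK", "version": 16000},
--     {id: 7, "title": "PiNK PLUS", "version": 17000},
--     {id: 8, "title": "MURASAKi", "version": 18000},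
--     {id: 9, "title": "MURASAKi PLUS", "version": 18500},
--     {id: 10, "title": "MiLK", "version": 19000},
--     {id: 11, "title": "MiLK PLUS", "version": 19500},
--     {id: 12, "title": "FiNALE", "version": 19900},
--     {id: 13, "title": "舞萌DX", "version": 20000},
--     {id: 15, "title": "舞萌DX 2021", "version": 21000},
--     {id: 17, "title": "舞萌DX 2022", "version": 22000},
--     {id: 19, "title": "舞萌DX 2023", "version": 23000},
--     {id: 21, "title": "舞萌DX 2024", "version": 24000},
-- ]
--
-- def get_version_name(version_code):
--     """
--     利用上面定义的版本信息查找对应的版本范围，并返回相应的版本名称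
--     """
--     # 确保版本列表是按版本号排序的
--     sorted_versions = sorted(versions, key=lambda x: x["version"])
--
--     for i, version in enumerate(sorted_versions):
--         # 如果是最后一个版本或版本号在当前和下一个版本之间
--         if (
--             i == len(sorted_versions) - 1
--             or version_code < sorted_versions[i + 1]["version"]
--         ):
--             return version["title"]
--
--     return "未知版本"  # 如果没有找到匹配的版本，返回未知版本
-- ===== SOURCE B (Python) =====
-- versions = [
--     {id: 0, "title": "maimai", "version": 10000},
--     {id: 1, "title": "maimai PLUS", "version": 11000},
--     {id: 2, "title": "GreeN", "version": 12000},
--     {id: 3, "title": "GreeN PLUS", "version": 13000},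
--     {id: 4, "title": "ORANGE", "version": 14000},
--     {id: 5, "title": "ORANGE PLUS", "version": 15000},
--     {id: 6, "title": "PiNK", "version": 16000},
--     {id: 7, "title": "PiNK PLUS", "version": 17000},
--     {id: 8, "title": "MURASAKi", "version": 18000},
--     {id: 9, "title": "MURASAKi PLUS", "version": 18500},
--     {id: 10, "title": "MiLK", "version": 19000},
--     {id: 11, "title": "MiLK PLUS", "version": 19500},
--     {id: 12, "title": "FiNALE", "version": 19900},
--     {id: 13, "title": "舞萌DX", "version": 20000},
--     {id: 15, "title": "舞萌DX 2021", "version": 21000},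
--     {id: 17, "title": "舞萌DX 2022", "version": 22000},
--     {id: 19, "title": "舞萌DX 2023", "version": 23000},
--     {id: 21, "title": "舞萌DX 2024", "version": 24000},
-- ]
--
--
-- def get_version_name(version_code):
--     """Binary search for the last version boundary <= version_code."""
--     sorted_versions = sorted(versions, key=lambda x: x["version"])
--     vals = [v["version"] for v in sorted_versions]
--     # hand-rolled bisect_right (A imports nothing, so no bisect module)
--     lo, hi = 0, len(vals)
--     while lo < hi:
--         mid = (lo + hi) // 2
--         if version_code < vals[mid]:
--             hi = mid
--         else:
--             lo = mid + 1
--     idx = lo - 1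
--     if idx < 0:
--         idx = 0
--     return sorted_versions[idx]["title"]
-- ===== Notes on version B (the rewrite author's own statement) =====
-- stated objective: alternative
-- what changed: Replaces A's linear scan with lookahead over the sorted versions by a hand-rolled bisect_right binary search on the boundary values, with the natural clamp idx=max(idx,0) reproducing A's mapping of below-minimum codes to the first title.
import Mathlib
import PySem

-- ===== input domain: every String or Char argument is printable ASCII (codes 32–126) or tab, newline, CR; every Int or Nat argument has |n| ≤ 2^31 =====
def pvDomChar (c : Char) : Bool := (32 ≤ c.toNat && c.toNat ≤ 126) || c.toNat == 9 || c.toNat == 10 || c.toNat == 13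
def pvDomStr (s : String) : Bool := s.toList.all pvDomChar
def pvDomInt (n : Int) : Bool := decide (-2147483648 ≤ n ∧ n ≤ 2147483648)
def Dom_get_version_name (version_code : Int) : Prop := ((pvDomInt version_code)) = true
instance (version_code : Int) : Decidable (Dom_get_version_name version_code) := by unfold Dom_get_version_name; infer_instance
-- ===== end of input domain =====

-- B replaces A's linear lookahead scan over the sorted version boundaries by a hand-rolled
-- bisect_right binary search (objective: alternative; same observable behaviour, including
-- the mapping of below-minimum codes to the first title).

-- ===== PORT A =====
-- The module constant `versions`: each dict is used only through its "version" and "title"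
-- entries (the `id`-keyed entry is never read), so a version is ported as (version, title).
def pvVersions : List (Int × String) :=
  [(10000, "maimai"), (11000, "maimai PLUS"), (12000, "GreeN"), (13000, "GreeN PLUS"),
   (14000, "ORANGE"), (15000, "ORANGE PLUS"), (16000, "PiNK"), (17000, "PiNK PLUS"),
   (18000, "MURASAKi"), (18500, "MURASAKi PLUS"), (19000, "MiLK"), (19500, "MiLK PLUS"),
   (19900, "FiNALE"), (20000, "舞萌DX"), (21000, "舞萌DX 2021"), (22000, "舞萌DX 2022"),
   (23000, "舞萌DX 2023"), (24000, "舞萌DX 2024")]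

-- A's `for i, version in enumerate(sorted_versions)` loop.  The `sorted_versions[i + 1]`
-- access is only reached when i < len - 1 (short-circuit `or`), so pyGetD's default is
-- never read there.
def pvLoopA (code : Int) (svs : List (Int × String)) : List (Int × (Int × String)) → String
  | [] => "未知版本"
  | (i, ver) :: rest =>
      if i = (svs.length : Int) - 1 ∨ code < (PySem.List.pyGetD svs (i + 1) (0, "")).1 then
        ver.2
      else pvLoopA code svs rest

def get_version_name (version_code : Int) : String :=
  let sorted_versions := PySem.List.sorted pvVersions (fun x => x.1)
  pvLoopA version_code sorted_versions (PySem.List.enumerate sorted_versions)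

-- ===== PORT B =====
-- Source B's hand-rolled bisect_right while-loop (lo, hi are nonnegative Python ints; (lo+hi)//2
-- on nonnegative operands is exactly Nat division).
def pvBisect (code : Int) (vals : List Int) (lo hi : Nat) : Nat :=
  if lo < hi then
    let mid := (lo + hi) / 2
    if code < PySem.List.pyGetD vals (mid : Int) 0 then pvBisect code vals lo mid
    else pvBisect code vals (mid + 1) hi
  else lo
termination_by hi - lo
decreasing_by all_goals omega

def get_version_name_alt (version_code : Int) : String :=
  let sorted_versions := PySem.List.sorted pvVersions (fun x => x.1)
  let vals := sorted_versions.map (fun v => v.1)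
  let lo := pvBisect version_code vals 0 vals.length
  let idx : Int := (lo : Int) - 1
  let idx := if idx < 0 then 0 else idx
  -- sorted_versions[idx]: idx is always in range here, so pyGetD's default is never read
  (PySem.List.pyGetD sorted_versions idx (0, "")).2

-- ===== PRECONDITION & SPEC =====
def Spec_get_version_name (version_code : Int) (out : String) : Prop := out = get_version_name_alt version_code
instance (version_code : Int) (out : String) : Decidable (Spec_get_version_name version_code out) := by unfold Spec_get_version_name; infer_instance

-- ===== CLAIM (what is proved, stated in full; the proofs are below) =====
def Claim_equal_get_version_name : Prop := ∀ (version_code : Int), Dom_get_version_name version_code → Spec_get_version_name version_code (get_version_name version_code)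

-- ===== LEMMAS AND PROOFS =====
set_option maxHeartbeats 1600000 in
lemma pvVersions_sorted : PySem.List.sorted pvVersions (fun x => x.1) = pvVersions := by
  apply PySem.List.sorted_eq_self_of_pairwise
  decide

-- closed form of the binary search on the concrete boundary list (proof-only helper)
set_option maxHeartbeats 1600000 in
lemma pvBisect_closed (version_code : Int) :
    pvBisect version_code [10000, 11000, 12000, 13000, 14000, 15000, 16000, 17000, 18000, 18500, 19000, 19500, 19900, 20000, 21000, 22000, 23000, 24000] 0 18 =
      (if version_code < 18500 then (if version_code < 14000 then (if version_code < 12000 then (if version_code < 11000 then (if version_code < 10000 then 0 else 1) else 2) else (if version_code < 13000 then 3 else 4)) else (if version_code < 17000 then (if version_code < 16000 then (if version_code < 15000 then 5 else 6) else 7) else (if version_code < 18000 then 8 else 9))) else (if version_code < 21000 then (if version_code < 19900 then (if version_code < 19500 then (if version_code < 19000 then 10 else 11) else 12) else (if version_code < 20000 then 13 else 14)) else (if version_code < 23000 then (if version_code < 22000 then 15 else 16) else (if version_code < 24000 then 17 else 18)))) := by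
  repeat (rw [pvBisect]; norm_num [PySem.List.pyGetD, PySem.List.pyIdx?, Int.toNat])

-- closed forms of the two ports (proof-only helpers)
set_option maxHeartbeats 4000000 in
lemma pvA_closed (version_code : Int) :
    get_version_name version_code = (if version_code < 11000 then "maimai" else (if version_code < 12000 then "maimai PLUS" else (if version_code < 13000 then "GreeN" else (if version_code < 14000 then "GreeN PLUS" else (if version_code < 15000 then "ORANGE" else (if version_code < 16000 then "ORANGE PLUS" else (if version_code < 17000 then "PiNK" else (if version_code < 18000 then "PiNK PLUS" else (if version_code < 18500 then "MURASAKi" else (if version_code < 19000 then "MURASAKi PLUS" else (if version_code < 19500 then "MiLK" else (if version_code < 19900 then "MiLK PLUS" else (if version_code < 20000 then "FiNALE" else (if version_code < 21000 then "舞萌DX" else (if version_code < 22000 then "舞萌DX 2021" else (if version_code < 23000 then "舞萌DX 2022" else (if version_code < 24000 then "舞萌DX 2023" else "舞萌DX 2024"))))))))))))))))) := by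
  unfold get_version_name
  rw [pvVersions_sorted]
  norm_num [pvVersions, pvLoopA, PySem.List.enumerate, PySem.List.pyGetD,
    PySem.List.pyIdx?, Int.toNat]

set_option maxHeartbeats 4000000 in
lemma pvB_closed (version_code : Int) :
    get_version_name_alt version_code = (if version_code < 18500 then (if version_code < 14000 then (if version_code < 12000 then (if version_code < 11000 then (if version_code < 10000 then "maimai" else "maimai") else "maimai PLUS") else (if version_code < 13000 then "GreeN" else "GreeN PLUS")) else (if version_code < 17000 then (if version_code < 16000 then (if version_code < 15000 then "ORANGE" else "ORANGE PLUS") else "PiNK") else (if version_code < 18000 then "PiNK PLUS" else "MURASAKi"))) else (if version_code < 21000 then (if version_code < 19900 then (if version_code < 19500 then (if version_code < 19000 then "MURASAKi PLUS" else "MiLK") else "MiLK PLUS") else (if version_code < 20000 then "FiNALE" else "舞萌DX")) else (if version_code < 23000 then (if version_code < 22000 then "舞萌DX 2021" else "舞萌DX 2022") else (if version_code < 24000 then "舞萌DX 2023" else "舞萌DX 2024")))) := by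
  unfold get_version_name_alt
  rw [pvVersions_sorted]
  norm_num [pvVersions, pvBisect_closed]
  split_ifs <;> first | omega | norm_num [PySem.List.pyGetD, PySem.List.pyIdx?, Int.toNat, pvVersions]

-- ===== VERDICT (by name: the statement is the Claim_ definition above) =====
theorem get_version_name_spec : Claim_equal_get_version_name := by
  intro v _
  unfold Spec_get_version_name
  rw [pvA_closed, pvB_closed]
  by_cases h0 : v < 10000
  · simp [h0, show v < 11000 from by omega, show v < 12000 from by omega, show v < 14000 from by omega, show v < 18500 from by omega]
  by_cases h1 : v < 11000
  · simp [h0, h1, show v < 12000 from by omega, show v < 14000 from by omega, show v < 18500 from by omega]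
  by_cases h2 : v < 12000
  · simp [h1, h2, show v < 14000 from by omega, show v < 18500 from by omega]
  by_cases h3 : v < 13000
  · simp [h1, h2, h3, show v < 14000 from by omega, show v < 18500 from by omega]
  by_cases h4 : v < 14000
  · simp [h1, h2, h3, h4, show v < 18500 from by omega]
  by_cases h5 : v < 15000
  · simp [h1, h2, h3, h4, h5, show v < 16000 from by omega, show v < 17000 from by omega, show v < 18500 from by omega]
  by_cases h6 : v < 16000
  · simp [h1, h2, h3, h4, h5, h6, show v < 17000 from by omega, show v < 18500 from by omega]
  by_cases h7 : v < 17000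
  · simp [h1, h2, h3, h4, h5, h6, h7, show v < 18500 from by omega]
  by_cases h8 : v < 18000
  · simp [h1, h2, h3, h4, h5, h6, h7, h8, show v < 18500 from by omega]
  by_cases h9 : v < 18500
  · simp [h1, h2, h3, h4, h5, h6, h7, h8, h9]
  by_cases h10 : v < 19000
  · simp [h1, h2, h3, h4, h5, h6, h7, h8, h9, h10, show v < 19500 from by omega, show v < 19900 from by omega, show v < 21000 from by omega]
  by_cases h11 : v < 19500
  · simp [h1, h2, h3, h4, h5, h6, h7, h8, h9, h10, h11, show v < 19900 from by omega, show v < 21000 from by omega]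
  by_cases h12 : v < 19900
  · simp [h1, h2, h3, h4, h5, h6, h7, h8, h9, h10, h11, h12, show v < 21000 from by omega]
  by_cases h13 : v < 20000
  · simp [h1, h2, h3, h4, h5, h6, h7, h8, h9, h10, h11, h12, h13, show v < 21000 from by omega]
  by_cases h14 : v < 21000
  · simp [h1, h2, h3, h4, h5, h6, h7, h8, h9, h10, h11, h12, h13, h14]
  by_cases h15 : v < 22000
  · simp [h1, h2, h3, h4, h5, h6, h7, h8, h9, h10, h11, h12, h13, h14, h15, show v < 23000 from by omega]
  by_cases h16 : v < 23000
  · simp [h1, h2, h3, h4, h5, h6, h7, h8, h9, h10, h11, h12, h13, h14, h15, h16]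
  by_cases h17 : v < 24000
  · simp [h1, h2, h3, h4, h5, h6, h7, h8, h9, h10, h11, h12, h13, h14, h15, h16, h17]
  simp [h1, h2, h3, h4, h5, h6, h7, h8, h9, h10, h11, h12, h13, h14, h15, h16, h17]
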